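-- pv_equiv track=rewrite | github.com/adanzl/leetcode-practice | py/cf/cf1831/cf1831b.py | func
-- ===== SOURCE A (Python) =====
-- from collections import defaultdict
--
-- def func(n, a, b):
--     c_a, c_b = defaultdict(int), defaultdict(int)
--     ans = 1
--     la, lb = 1, 1
--     for i in range(1, n):
--         if a[i] == a[i - 1]:
--             la += 1
--         else:
--             c_a[a[i - 1]] = max(c_a[a[i - 1]], la)
--             la = 1
--         if b[i] == b[i - 1]:
--             lb += 1
--         else:
--             c_b[b[i - 1]] = max(c_b[b[i - 1]], lb)
--             lb = 1
--     c_a[a[-1]] = max(c_a[a[-1]], la)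
--     c_b[b[-1]] = max(c_b[b[-1]], lb)
--     for k, v in c_a.items():
--         ans = max(ans, v + c_b[k])
--     for k, v in c_b.items():
--         ans = max(ans, v + c_a[k])
--     return ans
-- ===== SOURCE B (Python) =====
-- def func(n, a, b):
--     ra = _scored_runs(a, n)
--     rb = _scored_runs(b, n)
--     ans = 1
--     for v, l in ra:
--         best = 0
--         for w, m in rb:
--             if w == v and m > best:
--                 best = m
--         if l + best > ans:
--             ans = l + best
--     for w, m in rb:
--         best = 0
--         for v, l in ra:
--             if v == w and l > best:
--                 best = l
--         if m + best > ans: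
--             ans = m + best
--     return ans
--
--
-- def _scored_runs(xs, n):
--     # (value, length) of each maximal block of equal adjacent elements among
--     # the first n positions; the block still open when the scan stops is
--     # scored for the array's last element
--     runs = []
--     cur = 1
--     for i in range(1, n):
--         if xs[i] == xs[i - 1]:
--             cur += 1
--         else:
--             runs.append((xs[i - 1], cur))
--             cur = 1
--     runs.append((xs[-1], cur))
--     return runs
-- ===== Notes on version B (the rewrite author's own statement) =====
-- stated objective: alternative
-- what changed: B drops the hash tables entirely: it materialises each array's scored run list once and maximises run-length sums by direct nested scans over the two run lists (quadratic in the number of runs), instead of A's interleaved pass building two defaultdict per-value tables that the two combining loops then cross-mutate; Pre_ is exactly the no-IndexError condition (a and b nonempty, n <= both lengths).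
import Mathlib
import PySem

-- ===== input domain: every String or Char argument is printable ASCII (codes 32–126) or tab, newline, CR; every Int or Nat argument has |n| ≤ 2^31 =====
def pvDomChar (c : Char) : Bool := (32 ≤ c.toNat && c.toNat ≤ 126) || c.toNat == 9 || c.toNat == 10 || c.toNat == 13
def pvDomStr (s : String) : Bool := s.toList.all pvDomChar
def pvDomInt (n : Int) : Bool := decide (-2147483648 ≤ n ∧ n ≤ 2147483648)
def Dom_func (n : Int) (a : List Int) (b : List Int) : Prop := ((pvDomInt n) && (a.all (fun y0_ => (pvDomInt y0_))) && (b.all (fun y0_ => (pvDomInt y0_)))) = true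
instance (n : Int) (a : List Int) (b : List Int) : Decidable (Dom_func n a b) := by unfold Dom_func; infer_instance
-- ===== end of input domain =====

-- B drops the per-value hash tables: it materialises each array's scored run list once and
-- maximises run-length sums by nested scans over the two run lists, instead of A's interleaved
-- pass building two defaultdicts that the combining loops cross-mutate; same value wherever A returns.

-- ===== PORT A =====
-- defaultdict(int) read access: returns the (possibly grown) dict and the looked-up value
def ddGet (d : PySem.Dict Int Int) (k : Int) : PySem.Dict Int Int × Int :=
  match d.get? k with
  | some v => (d, v)
  | none => (d.insert k 0, 0)

-- one iteration of A's main loop for one of the two arrays (the same two branches for a and b)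
def stepA (xs : List Int) (s : PySem.Dict Int Int × Int) (i : Int) : PySem.Dict Int Int × Int :=
  if PySem.List.pyGetD xs i 0 = PySem.List.pyGetD xs (i - 1) 0 then (s.1, s.2 + 1)
  else
    let g := ddGet s.1 (PySem.List.pyGetD xs (i - 1) 0)
    (g.1.insert (PySem.List.pyGetD xs (i - 1) 0) (max g.2 s.2), 1)

-- c[xs[-1]] = max(c[xs[-1]], l)
def finishA (xs : List Int) (s : PySem.Dict Int Int × Int) : PySem.Dict Int Int :=
  let g := ddGet s.1 (PySem.List.pyGetD xs (-1) 0)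
  g.1.insert (PySem.List.pyGetD xs (-1) 0) (max g.2 s.2)

def func (n : Int) (a : List Int) (b : List Int) : Int :=
  let st := (PySem.List.pyRange 1 n).foldl
    (fun s i => (stepA a s.1 i, stepA b s.2 i))
    ((PySem.Dict.empty, 1), (PySem.Dict.empty, 1))
  let ca := finishA a st.1
  let cb := finishA b st.2
  let q := ca.items.foldl
    (fun (p : Int × PySem.Dict Int Int) kv =>
      let g := ddGet p.2 kv.1
      (max p.1 (kv.2 + g.2), g.1)) (1, cb)
  let r := q.2.items.foldl
    (fun (p : Int × PySem.Dict Int Int) kv =>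
      let g := ddGet p.2 kv.1
      (max p.1 (kv.2 + g.2), g.1)) (q.1, ca)
  r.1

-- ===== PORT B =====
-- _scored_runs(xs, n): one step of its scan
def stepB (xs : List Int) (s : List (Int × Int) × Int) (i : Int) : List (Int × Int) × Int :=
  if PySem.List.pyGetD xs i 0 = PySem.List.pyGetD xs (i - 1) 0 then (s.1, s.2 + 1)
  else (s.1 ++ [(PySem.List.pyGetD xs (i - 1) 0, s.2)], 1)

def scoredRuns (xs : List Int) (n : Int) : List (Int × Int) :=
  let s := (PySem.List.pyRange 1 n).foldl (stepB xs) ([], 1)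
  s.1 ++ [(PySem.List.pyGetD xs (-1) 0, s.2)]

-- the inner scan: for w, m in rs: if w == v and m > best: best = m
def innerBest (v : Int) (rs : List (Int × Int)) : Int :=
  rs.foldl (fun best p => if p.1 = v ∧ p.2 > best then p.2 else best) 0

def func_alt (n : Int) (a : List Int) (b : List Int) : Int :=
  let ra := scoredRuns a n
  let rb := scoredRuns b n
  let ans1 := ra.foldl
    (fun ans p => if p.2 + innerBest p.1 rb > ans then p.2 + innerBest p.1 rb else ans) 1
  rb.foldl
    (fun ans p => if p.2 + innerBest p.1 ra > ans then p.2 + innerBest p.1 ra else ans) ans1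

-- ===== PRECONDITION & SPEC =====
-- exactly the inputs on which A returns (no IndexError): nonempty arrays, n ≤ both lengths
def Pre_func (n : Int) (a : List Int) (b : List Int) : Prop :=
  a ≠ [] ∧ b ≠ [] ∧ n ≤ (a.length : Int) ∧ n ≤ (b.length : Int)
instance (n : Int) (a : List Int) (b : List Int) : Decidable (Pre_func n a b) := by
  unfold Pre_func; infer_instance

def pvWitness_func : Int × List Int × List Int := (2, [1, 1], [1, 2])

def Spec_func (n : Int) (a : List Int) (b : List Int) (out : Int) : Prop := out = func_alt n a b
instance (n : Int) (a : List Int) (b : List Int) (out : Int) : Decidable (Spec_func n a b out) := by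
  unfold Spec_func; infer_instance

-- ===== CLAIM (what is proved, stated in full; the proofs are below) =====
def Claim_equal_func : Prop := ∀ (n : Int) (a : List Int) (b : List Int),
  Dom_func n a b → Pre_func n a b → Spec_func n a b (func n a b)

-- ===== LEMMAS AND PROOFS =====

-- the canonical "record a finished run" dict update
def upd (d : PySem.Dict Int Int) (k l : Int) : PySem.Dict Int Int :=
  d.insert k (max (d.getD k 0) l)

-- folding a run list into a per-value max table
def runsFold (c : PySem.Dict Int Int) (rs : List (Int × Int)) : PySem.Dict Int Int :=
  rs.foldl (fun d kl => upd d kl.1 kl.2) c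

-- B's inner scan from an arbitrary starting best
def ibest (v : Int) (rs : List (Int × Int)) (acc : Int) : Int :=
  rs.foldl (fun best p => if p.1 = v ∧ p.2 > best then p.2 else best) acc

-- ddGet facts
lemma ddGet_snd (d : PySem.Dict Int Int) (k : Int) : (ddGet d k).2 = d.getD k 0 := by
  cases h : d.get? k <;> simp [ddGet, h, PySem.Dict.getD_eq_get?_getD]

lemma ddGet_fst_insert (d : PySem.Dict Int Int) (k v : Int) :
    (ddGet d k).1.insert k v = d.insert k v := by
  cases h : d.get? k <;> simp [ddGet, h, PySem.Dict.insert_insert_self]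

lemma ddGet_fst_getD (d : PySem.Dict Int Int) (k k' : Int) :
    (ddGet d k).1.getD k' 0 = d.getD k' 0 := by
  cases h : d.get? k with
  | some v => simp [ddGet, h]
  | none =>
    simp only [ddGet, h, PySem.Dict.getD_insert]
    split
    · next heq => subst heq; simp [PySem.Dict.getD_eq_get?_getD, h]
    · rfl

lemma ddGet_fst_mem_keys (d : PySem.Dict Int Int) (k k' : Int) :
    k' ∈ (ddGet d k).1.keys ↔ k' = k ∨ k' ∈ d.keys := by
  cases h : d.get? k with
  | some v =>
    have hk : k ∈ d.keys := by
      by_contra hk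
      rw [← PySem.Dict.get?_eq_none_iff_not_mem_keys] at hk
      simp [h] at hk
    simp only [ddGet, h]
    constructor
    · exact Or.inr
    · rintro (rfl | hm) <;> [exact hk; exact hm]
  | none => simp [ddGet, h, PySem.Dict.mem_keys_insert]

lemma ddGet_fst_nodup (d : PySem.Dict Int Int) (k : Int) (h : d.keys.Nodup) :
    (ddGet d k).1.keys.Nodup := by
  cases hg : d.get? k with
  | some v => simpa [ddGet, hg] using h
  | none =>
    have hc : d.contains k = false := by
      rw [PySem.Dict.contains_eq_isSome_get?, hg]; rfl
    have hk : k ∉ d.keys := (PySem.Dict.get?_eq_none_iff_not_mem_keys d k).mp hg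
    have : (d.insert k 0).keys = d.keys ++ [k] :=
      PySem.Dict.keys_insert_of_not_contains d 0 hc
    simp [ddGet, hg, this, List.nodup_append, h]
    intro x hx hxk
    exact hk (hxk ▸ hx)

lemma ddGet_upd (d : PySem.Dict Int Int) (k l : Int) :
    (ddGet d k).1.insert k (max (ddGet d k).2 l) = upd d k l := by
  rw [ddGet_snd, ddGet_fst_insert, upd]

-- stepA written with upd
lemma stepA_upd (xs : List Int) (s : PySem.Dict Int Int × Int) (i : Int) :
    stepA xs s i =
      if PySem.List.pyGetD xs i 0 = PySem.List.pyGetD xs (i - 1) 0 then (s.1, s.2 + 1)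
      else (upd s.1 (PySem.List.pyGetD xs (i - 1) 0) s.2, 1) := by
  by_cases h : PySem.List.pyGetD xs i 0 = PySem.List.pyGetD xs (i - 1) 0 <;>
    simp [stepA, h, ddGet_upd]

-- A's per-array scan state is B's scan state folded into a table
lemma rel_fold (xs : List Int) (l : List Int) : ∀ (out : List (Int × Int)) (cur : Int),
    l.foldl (stepA xs) (runsFold PySem.Dict.empty out, cur)
      = (runsFold PySem.Dict.empty (l.foldl (stepB xs) (out, cur)).1,
         (l.foldl (stepB xs) (out, cur)).2) := by
  induction l with
  | nil => intro out cur; rfl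
  | cons i t ih =>
    intro out cur
    simp only [List.foldl_cons, stepA_upd, stepB]
    by_cases h : PySem.List.pyGetD xs i 0 = PySem.List.pyGetD xs (i - 1) 0
    · rw [if_pos h, if_pos h]
      exact ih out (cur + 1)
    · rw [if_neg h, if_neg h]
      have : upd (runsFold PySem.Dict.empty out) (PySem.List.pyGetD xs (i - 1) 0) cur
          = runsFold PySem.Dict.empty (out ++ [(PySem.List.pyGetD xs (i - 1) 0, cur)]) := by
        simp [runsFold, List.foldl_append]
      rw [this]
      exact ih _ 1

-- A's finished per-array table is B's scored run list folded into a table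
lemma dict_runs (xs : List Int) (n : Int) :
    finishA xs ((PySem.List.pyRange 1 n).foldl (stepA xs) (PySem.Dict.empty, 1))
      = runsFold PySem.Dict.empty (scoredRuns xs n) := by
  have h0 : (PySem.Dict.empty, (1 : Int))
      = (runsFold PySem.Dict.empty ([] : List (Int × Int)), (1 : Int)) := rfl
  rw [h0, rel_fold]
  simp only [finishA, ddGet_upd, scoredRuns, runsFold, List.foldl_append, List.foldl_cons,
    List.foldl_nil]

-- the getD of a run table is B's inner scan
lemma getD_runsFold (rs : List (Int × Int)) : ∀ (d : PySem.Dict Int Int) (k : Int),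
    (runsFold d rs).getD k 0 = ibest k rs (d.getD k 0) := by
  induction rs with
  | nil => intro d k; rfl
  | cons p t ih =>
    intro d k
    obtain ⟨v, l⟩ := p
    simp only [runsFold, List.foldl_cons, ibest] at *
    rw [ih (upd d v l) k]
    congr 1
    simp only [upd, PySem.Dict.getD_insert]
    by_cases hv : v = k
    · subst hv
      by_cases hl : l > d.getD v 0
      · simp [hl, max_eq_right (le_of_lt hl)]
      · simp [hl, max_eq_left (by omega : l ≤ d.getD v 0)]
    · rw [if_neg (fun h => hv h.symm), if_neg (by simp [hv])]

lemma getD_runsFold_empty (rs : List (Int × Int)) (k : Int) :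
    (runsFold PySem.Dict.empty rs).getD k 0 = innerBest k rs := by
  rw [getD_runsFold rs PySem.Dict.empty k]
  rfl

-- key membership of a run table
lemma mem_keys_runsFold (rs : List (Int × Int)) : ∀ (d : PySem.Dict Int Int) (k : Int),
    k ∈ (runsFold d rs).keys ↔ k ∈ d.keys ∨ k ∈ rs.map Prod.fst := by
  induction rs with
  | nil => intro d k; simp [runsFold]
  | cons p t ih =>
    intro d k
    simp only [runsFold, List.foldl_cons, List.map_cons, List.mem_cons] at *
    rw [ih (upd d p.1 p.2) k]
    simp only [upd, PySem.Dict.mem_keys_insert]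
    tauto

lemma mem_keys_runsFold_empty (rs : List (Int × Int)) (k : Int) :
    k ∈ (runsFold PySem.Dict.empty rs).keys ↔ k ∈ rs.map Prod.fst := by
  rw [mem_keys_runsFold]
  simp [PySem.Dict.empty]

lemma runsFold_nodup (rs : List (Int × Int)) :
    (runsFold PySem.Dict.empty rs).keys.Nodup := by
  have h := PySem.Dict.nodup_keys_foldl_insert_key rs Prod.fst
    (fun d kl => max (d.getD kl.1 0) kl.2) PySem.Dict.empty (by simp)
  simpa [runsFold, upd] using h

-- ibest facts
lemma ibest_le (v : Int) (rs : List (Int × Int)) : ∀ acc, acc ≤ ibest v rs acc := by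
  induction rs with
  | nil => intro acc; exact le_refl _
  | cons p t ih =>
    intro acc
    simp only [ibest, List.foldl_cons] at *
    refine le_trans ?_ (ih _)
    split <;> omega

lemma le_ibest (v l : Int) (rs : List (Int × Int)) (h : (v, l) ∈ rs) :
    ∀ acc, l ≤ ibest v rs acc := by
  induction rs with
  | nil => exact absurd h (List.not_mem_nil)
  | cons p t ih =>
    intro acc
    rcases List.mem_cons.mp h with rfl | hm
    · simp only [ibest, List.foldl_cons]
      refine le_trans ?_ (ibest_le v t _)
      split
      · omega
      · next h =>
        simp only [not_and, not_lt] at h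
        exact h trivial
    · simp only [ibest, List.foldl_cons]
      exact ih hm _

lemma ibest_shape (v : Int) (rs : List (Int × Int)) : ∀ acc,
    ibest v rs acc = acc ∨ ∃ l, (v, l) ∈ rs ∧ ibest v rs acc = l := by
  induction rs with
  | nil => intro acc; exact Or.inl rfl
  | cons p t ih =>
    intro acc
    simp only [ibest, List.foldl_cons]
    by_cases h : p.1 = v ∧ p.2 > acc
    · rw [if_pos h]
      rcases ih p.2 with h1 | ⟨l, hl, h1⟩
      · exact Or.inr ⟨p.2, by rw [← h.1]; exact List.mem_cons_self .., h1⟩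
      · exact Or.inr ⟨l, List.mem_cons_of_mem _ hl, h1⟩
    · rw [if_neg h]
      rcases ih acc with h1 | ⟨l, hl, h1⟩
      · exact Or.inl h1
      · exact Or.inr ⟨l, List.mem_cons_of_mem _ hl, h1⟩

-- on positive run lists the inner scan attains a run's length for every present value
lemma ibest_attain (v : Int) (rs : List (Int × Int)) (hpos : ∀ p ∈ rs, 1 ≤ p.2)
    (hmem : v ∈ rs.map Prod.fst) : ∃ l, (v, l) ∈ rs ∧ innerBest v rs = l := by
  have h0 : innerBest v rs = ibest v rs 0 := rfl
  rcases ibest_shape v rs 0 with h | ⟨l, hl, h⟩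
  · obtain ⟨p, hp, hpv⟩ := List.mem_map.mp hmem
    have h1 : p.2 ≤ ibest v rs 0 := by
      have : (v, p.2) ∈ rs := by
        obtain ⟨p1, p2⟩ := p
        cases hpv
        exact hp
      exact le_ibest _ _ _ this 0
    have := hpos p hp
    omega
  · exact ⟨l, hl, by rw [h0, h]⟩

-- run lengths produced by B's scan are ≥ 1
lemma stepB_pos (xs : List Int) (l : List Int) : ∀ (out : List (Int × Int)) (cur : Int),
    (∀ p ∈ out, 1 ≤ p.2) → 1 ≤ cur →
      (∀ p ∈ (l.foldl (stepB xs) (out, cur)).1, 1 ≤ p.2) ∧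
        1 ≤ (l.foldl (stepB xs) (out, cur)).2 := by
  induction l with
  | nil => intro out cur h1 h2; exact ⟨h1, h2⟩
  | cons i t ih =>
    intro out cur h1 h2
    simp only [List.foldl_cons, stepB]
    by_cases h : PySem.List.pyGetD xs i 0 = PySem.List.pyGetD xs (i - 1) 0
    · rw [if_pos h]
      exact ih out (cur + 1) h1 (by omega)
    · rw [if_neg h]
      refine ih _ 1 ?_ le_rfl
      intro p hp
      rcases List.mem_append.mp hp with hp | hp
      · exact h1 p hp
      · rcases List.mem_singleton.mp hp with rfl
        exact h2

lemma scoredRuns_pos (xs : List Int) (n : Int) : ∀ p ∈ scoredRuns xs n, 1 ≤ p.2 := by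
  intro p hp
  simp only [scoredRuns] at hp
  rcases List.mem_append.mp hp with hp | hp
  · exact (stepB_pos xs _ [] 1 (by simp) le_rfl).1 p hp
  · rcases List.mem_singleton.mp hp with rfl
    exact (stepB_pos xs (PySem.List.pyRange 1 n) [] 1 (by simp) le_rfl).2

-- running max over an Int list: lower bounds and shape
lemma le_foldl_max (l : List Int) (init : Int) :
    init ≤ l.foldl (fun acc x => max acc x) init ∧
      ∀ x ∈ l, x ≤ l.foldl (fun acc x => max acc x) init := by
  induction l generalizing init with
  | nil => exact ⟨le_refl _, by simp⟩
  | cons y t ih =>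
    refine ⟨le_trans (le_max_left _ _) (ih (max init y)).1, ?_⟩
    intro x hx
    rcases List.mem_cons.mp hx with rfl | hm
    · exact le_trans (le_max_right _ _) (ih (max init x)).1
    · exact (ih (max init y)).2 x hm

lemma foldl_max_shape (l : List Int) (init : Int) :
    l.foldl (fun acc x => max acc x) init = init ∨
      ∃ x ∈ l, l.foldl (fun acc x => max acc x) init = x := by
  induction l generalizing init with
  | nil => exact Or.inl rfl
  | cons y t ih =>
    simp only [List.foldl_cons]
    rcases ih (max init y) with h | ⟨x, hx, h⟩
    · rcases max_choice init y with hm | hm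
      · exact Or.inl (by rw [h, hm])
      · exact Or.inr ⟨y, List.mem_cons_self .., by rw [h, hm]⟩
    · exact Or.inr ⟨x, List.mem_cons_of_mem _ hx, h⟩

-- two running maxes agree when each list's elements are dominated in the other
lemma foldl_max_dom_eq (l1 l2 : List Int) (init : Int)
    (h1 : ∀ x ∈ l1, ∃ y ∈ l2, x ≤ y) (h2 : ∀ y ∈ l2, ∃ x ∈ l1, y ≤ x) :
    l1.foldl (fun acc x => max acc x) init = l2.foldl (fun acc x => max acc x) init := by
  apply le_antisymm
  · rcases foldl_max_shape l1 init with h | ⟨x, hx, h⟩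
    · rw [h]; exact (le_foldl_max l2 init).1
    · rw [h]
      obtain ⟨y, hy, hxy⟩ := h1 x hx
      exact le_trans hxy ((le_foldl_max l2 init).2 y hy)
  · rcases foldl_max_shape l2 init with h | ⟨y, hy, h⟩
    · rw [h]; exact (le_foldl_max l1 init).1
    · rw [h]
      obtain ⟨x, hx, hyx⟩ := h2 y hy
      exact le_trans hyx ((le_foldl_max l1 init).2 x hx)

-- the dict component of A's combining loops
lemma loop_snd (items : List (Int × Int)) (ans : Int) (d : PySem.Dict Int Int) :
    (items.foldl
      (fun (p : Int × PySem.Dict Int Int) kv =>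
        let g := ddGet p.2 kv.1
        (max p.1 (kv.2 + g.2), g.1)) (ans, d)).2
      = items.foldl (fun d kv => (ddGet d kv.1).1) d := by
  induction items generalizing ans d with
  | nil => rfl
  | cons kv t ih => simp only [List.foldl_cons]; exact ih _ _

lemma fold2_getD (items : List (Int × Int)) (d : PySem.Dict Int Int) (k : Int) :
    (items.foldl (fun d kv => (ddGet d kv.1).1) d).getD k 0 = d.getD k 0 := by
  induction items generalizing d with
  | nil => rfl
  | cons kv t ih =>
    simp only [List.foldl_cons]
    rw [ih, ddGet_fst_getD]

lemma fold2_mem_keys (items : List (Int × Int)) (d : PySem.Dict Int Int) (k : Int) :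
    k ∈ (items.foldl (fun d kv => (ddGet d kv.1).1) d).keys
      ↔ k ∈ d.keys ∨ k ∈ items.map Prod.fst := by
  induction items generalizing d with
  | nil => simp
  | cons kv t ih =>
    simp only [List.foldl_cons, List.map_cons, List.mem_cons]
    rw [ih, ddGet_fst_mem_keys]
    tauto

lemma fold2_nodup (items : List (Int × Int)) (d : PySem.Dict Int Int) (h : d.keys.Nodup) :
    (items.foldl (fun d kv => (ddGet d kv.1).1) d).keys.Nodup := by
  induction items generalizing d with
  | nil => exact h
  | cons kv t ih =>
    simp only [List.foldl_cons]
    exact ih _ (ddGet_fst_nodup _ _ h)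

-- the answer component of A's combining loops
lemma loop_fst (items : List (Int × Int)) (ans : Int) (d : PySem.Dict Int Int) :
    (items.foldl
      (fun (p : Int × PySem.Dict Int Int) kv =>
        let g := ddGet p.2 kv.1
        (max p.1 (kv.2 + g.2), g.1)) (ans, d)).1
      = items.foldl (fun ans kv => max ans (kv.2 + d.getD kv.1 0)) ans := by
  induction items generalizing ans d with
  | nil => rfl
  | cons kv t ih =>
    simp only [List.foldl_cons]
    rw [ih, ddGet_snd]
    have he : ∀ acc, t.foldl (fun ans kv' => max ans (kv'.2 + (ddGet d kv.1).1.getD kv'.1 0)) acc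
        = t.foldl (fun ans kv' => max ans (kv'.2 + d.getD kv'.1 0)) acc := by
      induction t with
      | nil => intro acc; rfl
      | cons kv' t' ih' =>
        intro acc
        simp only [List.foldl_cons, ddGet_fst_getD]
    exact he _

-- B's outer-loop step is a running max
lemma if_max (ans c : Int) : (if c > ans then c else ans) = max ans c := by
  split <;> omega

-- a fold of running maxes is a running max over the mapped list
lemma foldl_max_map {α : Type} (L : List α) (f : α → Int) (init : Int) :
    L.foldl (fun acc x => max acc (f x)) init
      = (L.map f).foldl (fun acc x => max acc x) init := by
  induction L generalizing init with
  | nil => rfl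
  | cons x t ih => simp only [List.foldl_cons, List.map_cons]; exact ih _

-- a key of a nodup dict is an item with its getD value
lemma mem_items_self (d : PySem.Dict Int Int) (k : Int)
    (hk : k ∈ d.keys) : (k, d.getD k 0) ∈ d.items := by
  obtain ⟨v, hv⟩ : ∃ v, d.get? k = some v := by
    cases h : d.get? k with
    | none => exact absurd ((PySem.Dict.get?_eq_none_iff_not_mem_keys d k).mp h) (not_not_intro hk)
    | some v => exact ⟨v, rfl⟩
  have : d.getD k 0 = v := by simp [PySem.Dict.getD_eq_get?_getD, hv]
  rw [this]
  exact PySem.Dict.mem_items_of_get?_eq_some d hv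

-- ===== VERDICT (by name: the statement is the Claim_ definition above) =====
theorem func_spec : Claim_equal_func := by
  intro n a b _ _
  show func n a b = func_alt n a b
  simp only [func, func_alt]
  rw [PySem.List.foldl_prod_mk (f := stepA a) (g := stepA b)]
  rw [dict_runs a n, dict_runs b n]
  set ra := scoredRuns a n with hra
  set rb := scoredRuns b n with hrb
  set CA := runsFold PySem.Dict.empty ra with hCA
  set CB := runsFold PySem.Dict.empty rb with hCB
  have hndA : CA.keys.Nodup := runsFold_nodup ra
  have hndB : CB.keys.Nodup := runsFold_nodup rb
  rw [loop_snd CA.items 1 CB, loop_fst CA.items 1 CB, loop_fst]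
  set E := CA.items.foldl (fun d kv => (ddGet d kv.1).1) CB with hE
  have hndE : E.keys.Nodup := fold2_nodup _ _ hndB
  -- rewrite B's outer loops into running maxes
  have hb1 : ∀ (rs rs' : List (Int × Int)) (init : Int),
      rs.foldl (fun ans p => if p.2 + innerBest p.1 rs' > ans then p.2 + innerBest p.1 rs' else ans) init
        = rs.foldl (fun ans p => max ans (p.2 + innerBest p.1 rs')) init := by
    intro rs rs' init
    induction rs generalizing init with
    | nil => rfl
    | cons p t ih =>
      simp only [List.foldl_cons, if_max]
  rw [hb1, hb1]
  -- turn all four loops into running maxes over Int lists and compare memberships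
  rw [foldl_max_map CA.items (fun kv => kv.2 + CB.getD kv.1 0) 1,
      foldl_max_map E.items (fun kv => kv.2 + CA.getD kv.1 0),
      foldl_max_map ra (fun p => p.2 + innerBest p.1 rb) 1,
      foldl_max_map rb (fun p => p.2 + innerBest p.1 ra),
      ← List.foldl_append, ← List.foldl_append]
  apply foldl_max_dom_eq
  · -- every A-side term is matched by a B-side term
    intro x hx
    rcases List.mem_append.mp hx with hx | hx
    · obtain ⟨kv, hkv, rfl⟩ := List.mem_map.mp hx
      have hv : kv.2 = CA.getD kv.1 0 := (PySem.Dict.getD_of_mem_items CA hkv hndA 0).symm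
      have hk : kv.1 ∈ ra.map Prod.fst := by
        rw [← mem_keys_runsFold_empty, ← hCA]
        exact List.mem_map.mpr ⟨kv, hkv, rfl⟩
      obtain ⟨l, hl, hatt⟩ := ibest_attain kv.1 ra (hra ▸ scoredRuns_pos a n) hk
      refine ⟨l + innerBest kv.1 rb, List.mem_append.mpr (Or.inl ?_), ?_⟩
      · exact List.mem_map.mpr ⟨(kv.1, l), hl, rfl⟩
      · rw [hv, hCA, getD_runsFold_empty, hCB, getD_runsFold_empty, hatt]
    · obtain ⟨kv, hkv, rfl⟩ := List.mem_map.mp hx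
      have hv : kv.2 = E.getD kv.1 0 := (PySem.Dict.getD_of_mem_items E hkv hndE 0).symm
      have hvB : kv.2 = CB.getD kv.1 0 := by rw [hv, hE, fold2_getD]
      have hk : kv.1 ∈ E.keys := List.mem_map.mpr ⟨kv, hkv, rfl⟩
      rw [hE, fold2_mem_keys] at hk
      rcases hk with hk | hk
      · -- key of CB: match with B's second loop
        rw [hCB, mem_keys_runsFold_empty] at hk
        obtain ⟨m, hm, hatt⟩ := ibest_attain kv.1 rb (hrb ▸ scoredRuns_pos b n) hk
        refine ⟨m + innerBest kv.1 ra, List.mem_append.mpr (Or.inr ?_), ?_⟩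
        · exact List.mem_map.mpr ⟨(kv.1, m), hm, rfl⟩
        · rw [hvB, hCB, getD_runsFold_empty, hCA, getD_runsFold_empty, hatt]
      · -- key of CA: match with B's first loop
        have hk' : kv.1 ∈ ra.map Prod.fst := by
          rw [← mem_keys_runsFold_empty, ← hCA]
          exact hk
        obtain ⟨l, hl, hatt⟩ := ibest_attain kv.1 ra (hra ▸ scoredRuns_pos a n) hk'
        refine ⟨l + innerBest kv.1 rb, List.mem_append.mpr (Or.inl ?_), ?_⟩
        · exact List.mem_map.mpr ⟨(kv.1, l), hl, rfl⟩
        · rw [hvB, hCB, getD_runsFold_empty, hCA, getD_runsFold_empty, hatt]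
          omega
  · -- every B-side term is matched by an A-side term
    intro y hy
    rcases List.mem_append.mp hy with hy | hy
    · obtain ⟨p, hp, rfl⟩ := List.mem_map.mp hy
      have hk : p.1 ∈ CA.keys := by
        rw [hCA, mem_keys_runsFold_empty]
        exact List.mem_map.mpr ⟨p, hp, rfl⟩
      refine ⟨CA.getD p.1 0 + CB.getD p.1 0, List.mem_append.mpr (Or.inl ?_), ?_⟩
      · exact List.mem_map.mpr ⟨(p.1, CA.getD p.1 0), mem_items_self CA p.1 hk, rfl⟩
      · have h1 : p.2 ≤ CA.getD p.1 0 := by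
          rw [hCA, getD_runsFold_empty]
          exact le_ibest p.1 p.2 ra (by obtain ⟨p1, p2⟩ := p; exact hp) 0
        have h2 : innerBest p.1 rb = CB.getD p.1 0 := by
          rw [hCB, getD_runsFold_empty]
        omega
    · obtain ⟨p, hp, rfl⟩ := List.mem_map.mp hy
      have hk : p.1 ∈ E.keys := by
        rw [hE, fold2_mem_keys]
        left
        rw [hCB, mem_keys_runsFold_empty]
        exact List.mem_map.mpr ⟨p, hp, rfl⟩
      refine ⟨E.getD p.1 0 + CA.getD p.1 0, List.mem_append.mpr (Or.inr ?_), ?_⟩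
      · exact List.mem_map.mpr ⟨(p.1, E.getD p.1 0), mem_items_self E p.1 hk, rfl⟩
      · have h1 : p.2 ≤ CB.getD p.1 0 := by
          rw [hCB, getD_runsFold_empty]
          exact le_ibest p.1 p.2 rb (by obtain ⟨p1, p2⟩ := p; exact hp) 0
        have h2 : innerBest p.1 ra = CA.getD p.1 0 := by
          rw [hCA, getD_runsFold_empty]
        have h3 : E.getD p.1 0 = CB.getD p.1 0 := by rw [hE, fold2_getD]
        omega
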